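-- pv_equiv track=rewrite | github.com/jmsancho/generative | circuit_v2_2.py | list_points
-- ===== SOURCE A (Python) =====
-- def list_points(length,direction, current):
--     '''
--     Returns a list of the points included within a line.
--     Takes the current point as parameter.
--
--     '''
--     if direction == 0:
--         list = [(current[0],current[1]-i) for i in range(length+1)]
--     elif direction == 1:
--         list = [(current[0],current[1]+i) for i in range(length+1)]
--     elif direction == 2:
--         list = [(current[0]-i,current[1]) for i in range(length+1)]
--     else:
--         list = [(current[0]+i,current[1]) for i in range(length+1)]
--     list.pop(0)
--     return list
-- ===== SOURCE B (Python) =====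
-- def list_points(length, direction, current):
--     points = []
--     x, y = current
--     n = length
--     while n > 0:
--         if direction == 0:
--             y -= 1
--         elif direction == 1:
--             y += 1
--         elif direction == 2:
--             x -= 1
--         else:
--             x += 1
--         points.append((x, y))
--         n -= 1
--     return points
-- ===== Notes on version B (the rewrite author's own statement) =====
-- stated objective: alternative
-- what changed: Replaces A's build-the-whole-line-from-offsets (four comprehensions over range(length+1) plus pop(0)) with an incremental walk: a single loop that mutates the current point one step at a time and appends each new point, never materialising or dropping the origin.
import Mathlib
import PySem

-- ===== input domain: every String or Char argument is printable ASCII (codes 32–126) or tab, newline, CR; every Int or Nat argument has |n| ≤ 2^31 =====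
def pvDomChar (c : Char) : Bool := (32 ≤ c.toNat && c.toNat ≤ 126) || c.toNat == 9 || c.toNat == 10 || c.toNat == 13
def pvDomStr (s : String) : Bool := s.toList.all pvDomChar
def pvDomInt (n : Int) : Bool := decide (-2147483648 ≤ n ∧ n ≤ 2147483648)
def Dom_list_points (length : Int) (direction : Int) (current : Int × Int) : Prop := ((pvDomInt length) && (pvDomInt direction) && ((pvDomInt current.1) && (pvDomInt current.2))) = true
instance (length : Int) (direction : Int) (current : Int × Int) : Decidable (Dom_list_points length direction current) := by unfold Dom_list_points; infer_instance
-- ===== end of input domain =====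

-- B replaces A's four offset comprehensions over range(length+1) plus pop(0) by an incremental
-- walk that steps the current point and appends each new point (objective: alternative).
-- Return values proved equal for length ≥ 0; A raises IndexError when length < 0, B returns [].

-- ===== PORT A =====
def list_points (length : Int) (direction : Int) (current : Int × Int) : List (Int × Int) :=
  let lst : List (Int × Int) :=
    if direction == 0 then
      (PySem.List.pyRange 0 (length + 1) 1).map (fun i => (current.1, current.2 - i))
    else if direction == 1 then
      (PySem.List.pyRange 0 (length + 1) 1).map (fun i => (current.1, current.2 + i))
    else if direction == 2 then
      (PySem.List.pyRange 0 (length + 1) 1).map (fun i => (current.1 - i, current.2))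
    else
      (PySem.List.pyRange 0 (length + 1) 1).map (fun i => (current.1 + i, current.2))
  match PySem.List.pop? lst 0 with   -- list.pop(0); none = IndexError, excluded by Pre_
  | some (_, rest) => rest
  | none => []

-- ===== PORT B =====
-- the 'while n > 0' loop of Source B: n is the remaining step count (ends at n ≤ 0, i.e. toNat = 0)
def pvWalk (n : Nat) (direction : Int) (x y : Int) : List (Int × Int) :=
  match n with
  | 0 => []
  | Nat.succ m =>
    let p : Int × Int :=
      if direction == 0 then (x, y - 1)
      else if direction == 1 then (x, y + 1)
      else if direction == 2 then (x - 1, y)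
      else (x + 1, y)
    p :: pvWalk m direction p.1 p.2

def list_points_alt (length : Int) (direction : Int) (current : Int × Int) : List (Int × Int) :=
  pvWalk length.toNat direction current.1 current.2

-- ===== PRECONDITION & SPEC =====
-- A raises IndexError (pop(0) on the empty list) exactly when length < 0; Pre_ excludes that.
def Pre_list_points (length : Int) (direction : Int) (current : Int × Int) : Prop := 0 ≤ length
instance (length : Int) (direction : Int) (current : Int × Int) : Decidable (Pre_list_points length direction current) := by unfold Pre_list_points; infer_instance
def pvWitness_list_points : Int × Int × (Int × Int) := (3, 2, (5, -4))

def Spec_list_points (length : Int) (direction : Int) (current : Int × Int) (out : List (Int × Int)) : Prop := out = list_points_alt length direction current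
instance (length : Int) (direction : Int) (current : Int × Int) (out : List (Int × Int)) : Decidable (Spec_list_points length direction current out) := by unfold Spec_list_points; infer_instance

-- ===== CLAIM (what is proved, stated in full; the proofs are below) =====
def Claim_equal_list_points : Prop := ∀ (length : Int) (direction : Int) (current : Int × Int), Dom_list_points length direction current → Pre_list_points length direction current → Spec_list_points length direction current (list_points length direction current)

-- ===== LEMMAS AND PROOFS =====

-- the walk, in closed form: the k-th appended point is (x + dx*(k+1), y + dy*(k+1))
theorem pvWalk_eq (d dx dy : Int)
    (h : ∀ x y : Int,
      (if d == 0 then (x, y - 1) else if d == 1 then (x, y + 1)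
       else if d == 2 then (x - 1, y) else (x + 1, y)) = (x + dx, y + dy)) :
    ∀ (n : Nat) (x y : Int),
      pvWalk n d x y = (List.range n).map (fun (k : Nat) => (x + dx * ((k : Int) + 1), y + dy * ((k : Int) + 1))) := by
  intro n
  induction n with
  | zero => intro x y; simp [pvWalk]
  | succ m ih =>
    intro x y
    simp only [pvWalk, h]
    rw [ih (x + dx) (y + dy), List.range_succ_eq_map, List.map_cons, List.map_map]
    refine List.cons_eq_cons.mpr ⟨?_, ?_⟩
    · simp only [Prod.mk.injEq]; constructor <;> push_cast <;> ring
    · apply List.map_congr_left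
      intro k _
      simp only [Function.comp, Nat.succ_eq_add_one, Prod.mk.injEq]
      constructor <;> push_cast <;> ring

-- A's list-then-pop, in closed form over the same range
theorem pyRange_map_tail (length : Int) (hl : 0 ≤ length) (f : Int → Int × Int) :
    (match PySem.List.pop? ((PySem.List.pyRange 0 (length + 1) 1).map f) 0 with
     | some (_, rest) => rest
     | none => []) = (List.range length.toNat).map (fun (k : Nat) => f ((k : Int) + 1)) := by
  rw [PySem.List.pyRange_one]
  have h1 : (length + 1 - 0).toNat = length.toNat + 1 := by omega
  rw [h1, List.range_succ_eq_map, List.map_cons, List.map_cons]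
  simp only [PySem.List.pop?, PySem.List.pyIdx?]
  norm_num

-- ===== VERDICT (by name: the statement is the Claim_ definition above) =====
theorem list_points_spec : Claim_equal_list_points := by
  intro length direction current _ hpre
  unfold Spec_list_points list_points list_points_alt
  by_cases h0 : direction = 0
  · subst h0
    rw [pvWalk_eq 0 0 (-1) (fun x y => by simp [Prod.ext_iff]; try omega)]
    simp only [show ((0:Int) == 0) = true from rfl, if_true]
    rw [pyRange_map_tail length hpre]
    apply List.map_congr_left; intro k _; simp [Prod.ext_iff]; try ring
  · by_cases h1 : direction = 1
    · subst h1
      rw [pvWalk_eq 1 0 1 (fun x y => by simp [Prod.ext_iff]; try omega)]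
      simp only [show ((1:Int) == 0) = false from rfl, show ((1:Int) == 1) = true from rfl,
        Bool.false_eq_true, if_false, if_true]
      rw [pyRange_map_tail length hpre]
      apply List.map_congr_left; intro k _; simp [Prod.ext_iff]; try ring
    · by_cases h2 : direction = 2
      · subst h2
        rw [pvWalk_eq 2 (-1) 0 (fun x y => by simp [Prod.ext_iff]; try omega)]
        simp only [show ((2:Int) == 0) = false from rfl, show ((2:Int) == 1) = false from rfl,
          show ((2:Int) == 2) = true from rfl, Bool.false_eq_true, if_false, if_true]
        rw [pyRange_map_tail length hpre]
        apply List.map_congr_left; intro k _; simp [Prod.ext_iff]; try ring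
      · have d0 : (direction == 0) = false := by simp [h0]
        have d1 : (direction == 1) = false := by simp [h1]
        have d2 : (direction == 2) = false := by simp [h2]
        rw [pvWalk_eq direction 1 0 (fun x y => by simp [d0, d1, d2, Prod.ext_iff]; try omega)]
        simp only [d0, d1, d2, Bool.false_eq_true, if_false]
        rw [pyRange_map_tail length hpre]
        apply List.map_congr_left; intro k _; simp [Prod.ext_iff]; try ring
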